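-- pv_equiv track=rewrite | github.com/syedmhashim/coding-challenges | make_anagrams/python/main.py | make_anagrams
-- ===== SOURCE A (Python) =====
-- def remove_uncommon_chars(s, intersection, deletion):
--     for chr in s:
--         if chr not in intersection:
--             deletion += 1
--     return deletion
--
-- def calculate_char_frequency(a):
--     char_frequency_dict = dict((i,0) for i in set(a))
--     for chr in a:
--         char_frequency_dict[chr] = char_frequency_dict[chr] + 1
--     return char_frequency_dict
--
-- def make_anagrams(a, b):
--     total_deletion = 0
--     a_b_intersection =set(a).intersection(set(b))
--
--     char_frequency_a = calculate_char_frequency(a)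
--     char_frequency_b = calculate_char_frequency(b)
--
--     total_deletion = remove_uncommon_chars(a, a_b_intersection, total_deletion)
--     total_deletion = remove_uncommon_chars(b, a_b_intersection, total_deletion)
--
--     for chr in a_b_intersection:
--         total_deletion += abs(char_frequency_a[chr] - char_frequency_b[chr])
--     return total_deletion
-- ===== SOURCE B (Python) =====
-- def make_anagrams(a, b):
--     common = set(a) & set(b)
--     overlap = sum(min(a.count(c), b.count(c)) for c in common)
--     return len(a) + len(b) - 2 * overlap
-- ===== Notes on version B (the rewrite author's own statement) =====
-- stated objective: simpler
-- what changed: Replaces A's frequency-dict construction, two uncommon-char string passes and abs-difference intersection loop with the closed formula len(a)+len(b)-2*sum(min(a.count(c),b.count(c)) for c in set(a)&set(b)); str.count runs at C speed instead of A's per-char Python-level dict updates.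
import Mathlib
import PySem

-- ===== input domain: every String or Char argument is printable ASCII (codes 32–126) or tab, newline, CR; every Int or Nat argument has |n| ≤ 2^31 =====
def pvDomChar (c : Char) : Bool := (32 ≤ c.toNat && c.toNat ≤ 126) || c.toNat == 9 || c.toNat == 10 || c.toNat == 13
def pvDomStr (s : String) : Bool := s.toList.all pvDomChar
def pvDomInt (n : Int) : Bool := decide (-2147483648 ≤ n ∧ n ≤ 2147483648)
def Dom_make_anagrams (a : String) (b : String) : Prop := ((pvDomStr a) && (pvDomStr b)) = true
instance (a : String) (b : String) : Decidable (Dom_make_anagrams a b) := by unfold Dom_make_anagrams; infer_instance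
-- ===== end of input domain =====

-- B replaces A's two uncommon-char passes + per-char abs-difference loop by the closed formula
-- len(a) + len(b) - 2 * (shared character overlap): simpler, one expression, no frequency dicts.


-- ===== PORT A =====
def remove_uncommon_chars (s : List Char) (intersection : PySem.Set Char) (deletion : Int) : Int :=
  s.foldl (fun del c => if !(PySem.Set.contains intersection c) then del + 1 else del) deletion

def calculate_char_frequency (a : List Char) : PySem.Dict Char Int :=
  let char_frequency_dict : PySem.Dict Char Int :=
    PySem.Dict.ofList ((PySem.Set.ofList a).map (fun c => (c, 0)))
  -- d[chr] = d[chr] + 1: the key is always present (the dict was initialised over set(a)),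
  -- so Python's d[chr] never raises and getD c 0 is exact here
  a.foldl (fun d c => d.insert c (d.getD c 0 + 1)) char_frequency_dict

def make_anagrams (a : String) (b : String) : Int :=
  let total_deletion : Int := 0
  let a_b_intersection := PySem.Set.inter (PySem.Set.ofList a.toList) (PySem.Set.ofList b.toList)
  let char_frequency_a := calculate_char_frequency a.toList
  let char_frequency_b := calculate_char_frequency b.toList
  let t1 := remove_uncommon_chars a.toList a_b_intersection total_deletion
  let t2 := remove_uncommon_chars b.toList a_b_intersection t1
  -- 'for chr in a_b_intersection: total += abs(...)': a sum over a set, order-independent;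
  -- both dict lookups always hit (chr ∈ set(a) and chr ∈ set(b)), so getD _ 0 is exact
  a_b_intersection.foldl (fun t c => t + |char_frequency_a.getD c 0 - char_frequency_b.getD c 0|) t2

-- ===== PORT B =====
def make_anagrams_alt (a : String) (b : String) : Int :=
  let common := PySem.Set.inter (PySem.Set.ofList a.toList) (PySem.Set.ofList b.toList)
  -- a.count(c) with c a single character = character count (exact for length-1 needles);
  -- the generator sum over the set is order-independent
  let overlap : Int := (common.map (fun c => min (a.toList.count c : Int) (b.toList.count c : Int))).sum
  PySem.Str.len a + PySem.Str.len b - 2 * overlap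

-- ===== PRECONDITION & SPEC =====
def Spec_make_anagrams (a : String) (b : String) (out : Int) : Prop := out = make_anagrams_alt a b
instance (a : String) (b : String) (out : Int) : Decidable (Spec_make_anagrams a b out) := by unfold Spec_make_anagrams; infer_instance

-- ===== CLAIM (what is proved, stated in full; the proofs are below) =====
def Claim_equal_make_anagrams : Prop := ∀ (a : String) (b : String), Dom_make_anagrams a b → Spec_make_anagrams a b (make_anagrams a b)

-- ===== LEMMAS AND PROOFS =====

-- the zero-initialised frequency dict returns 0 everywhere (present keys hold 0, absent default to 0)
lemma getD_zero_init (S : List Char) (v : Char) :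
    (PySem.Dict.ofList (S.map (fun c => (c, (0 : Int))))).getD v 0 = 0 := by
  have h : ∀ (d : PySem.Dict Char Int), d.getD v 0 = 0 →
      ((S.map (fun c => (c, (0 : Int)))).foldl (fun acc p => acc.insert p.1 p.2) d).getD v 0 = 0 := by
    induction S with
    | nil => intro d hd; simpa using hd
    | cons x t ih =>
      intro d hd
      simp only [List.map_cons, List.foldl_cons]
      exact ih _ (by rw [PySem.Dict.getD_insert]; split <;> simp [hd])
  exact h PySem.Dict.empty (by simp [PySem.Dict.getD_empty])

lemma freq_getD (l : List Char) (v : Char) :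
    (calculate_char_frequency l).getD v 0 = (l.count v : Int) := by
  unfold calculate_char_frequency
  rw [PySem.Dict.getD_foldl_insert_add_one, getD_zero_init]
  ring

-- membership count over a duplicate-free list equals the countP of membership
lemma countP_mem_cons (la : List Char) (s : Char) (S : List Char) (hs : s ∉ S) :
    la.countP (fun c => decide (c ∈ s :: S)) =
      la.count s + la.countP (fun c => decide (c ∈ S)) := by
  induction la with
  | nil => simp
  | cons x t ih =>
    rw [List.countP_cons, List.countP_cons, List.count_cons, ih]
    by_cases hx : x = s
    · subst hx
      have hxS : x ∉ S := hs
      simp [hxS]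
      omega
    · by_cases hxS : x ∈ S <;> simp [hx, hxS] <;> omega

lemma sum_count_eq_countP (S la : List Char) (h : S.Nodup) :
    (S.map (fun c => (la.count c : Int))).sum = (la.countP (fun c => decide (c ∈ S)) : Int) := by
  induction S with
  | nil => simp
  | cons s t ih =>
    rcases List.nodup_cons.mp h with ⟨hs, ht⟩
    rw [List.map_cons, List.sum_cons, ih ht, countP_mem_cons la s t hs]
    push_cast; ring

-- Σ (f + g - 2*min f g) over a list splits into the three sums
lemma sum_map_add_sub_min (l : List Char) (f g : Char → Int) :
    (l.map (fun c => f c + g c - 2 * min (f c) (g c))).sum =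
      (l.map f).sum + (l.map g).sum - 2 * (l.map (fun c => min (f c) (g c))).sum := by
  induction l with
  | nil => simp
  | cons x t ih => simp [ih]; ring

lemma abs_sub_counts (na nb : Nat) :
    |(na : Int) - nb| = (na : Int) + nb - 2 * min (na : Int) (nb : Int) := by
  rcases le_total (na : Int) nb with h | h
  · rw [abs_of_nonpos (by omega), min_eq_left h]; ring
  · rw [abs_of_nonneg (by omega), min_eq_right h]; ring

-- ===== VERDICT (by name: the statement is the Claim_ definition above) =====
theorem make_anagrams_spec : Claim_equal_make_anagrams := by
  intro a b _
  simp only [Spec_make_anagrams, make_anagrams, make_anagrams_alt, remove_uncommon_chars]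
  set la := a.toList with hla
  set lb := b.toList with hlb
  set inter := PySem.Set.inter (PySem.Set.ofList la) (PySem.Set.ofList lb) with hinter
  have hnd : inter.Nodup := PySem.Set.nodup_inter _ _ (PySem.Set.nodup_ofList la)
  -- the two uncommon-char loops
  rw [PySem.List.foldl_if_add_one (fun c => !(PySem.Set.contains inter c)) la 0]
  rw [PySem.List.foldl_if_add_one (fun c => !(PySem.Set.contains inter c)) lb _]
  -- the abs-difference loop over the intersection
  rw [PySem.List.foldl_add inter (fun c => |(calculate_char_frequency la).getD c 0 - (calculate_char_frequency lb).getD c 0|)]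
  -- frequency dicts are counts
  have hmap : inter.map (fun c => |(calculate_char_frequency la).getD c 0 - (calculate_char_frequency lb).getD c 0|)
      = inter.map (fun c => (la.count c : Int) + lb.count c - 2 * min (la.count c : Int) (lb.count c : Int)) := by
    apply List.map_congr_left
    intro c _
    rw [freq_getD, freq_getD, abs_sub_counts]
  rw [hmap, sum_map_add_sub_min inter (fun c => (la.count c : Int)) (fun c => (lb.count c : Int))]
  rw [sum_count_eq_countP inter la hnd, sum_count_eq_countP inter lb hnd]
  -- uncommon countP + common countP = length
  have hsplit : ∀ (l : List Char),
      (l.countP (fun c => !(PySem.Set.contains inter c)) : Int)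
        = (l.length : Int) - l.countP (fun c => decide (c ∈ inter)) := by
    intro l
    have := List.length_eq_countP_add_countP (l := l) (fun c => decide (c ∈ inter))
    have hcongr : l.countP (fun c => !(PySem.Set.contains inter c))
        = l.countP (fun c => decide (¬ (decide (c ∈ inter) = true))) := by
      apply List.countP_congr
      intro c _
      simp [PySem.Set.contains_eq_listContains]
    rw [hcongr]
    omega
  rw [hsplit la, hsplit lb, PySem.Str.len_eq, PySem.Str.len_eq, ← hla, ← hlb]
  ring
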